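-- pv_equiv track=rewrite | github.com/smbursuc/AEA-Graph-Coloring | improvements/tabucol.py | f
-- ===== SOURCE A (Python) =====
-- def f(adjacency_matrix, color_matrix):
--     conflicts = 0
--     num_nodes = len(adjacency_matrix)
--     for i in range(num_nodes):
--         for j in range(i + 1, num_nodes):
--             if adjacency_matrix[i][j] and color_matrix[i] == color_matrix[j]:
--                 conflicts += 1
--     return conflicts // 2  # Divide by 2 because each conflict is counted twice
-- ===== SOURCE B (Python) =====
-- def f(adjacency_matrix, color_matrix):
--     # One pass over nodes: a hash index (color -> earlier nodes of that color)
--     # replaces A's scan of the whole upper triangle.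
--     n = len(adjacency_matrix)
--     groups = {}
--     conflicts = 0
--     for j in range(n):
--         color = color_matrix[j]
--         for a in groups.get(color, []):
--             if adjacency_matrix[a][j]:
--                 conflicts += 1
--         groups.setdefault(color, []).append(j)
--     return conflicts // 2
-- ===== Notes on version B (the rewrite author's own statement) =====
-- stated objective: alternative
-- what changed: B replaces A's full upper-triangle double scan by a single pass that maintains a dict from color to the earlier nodes of that color, so the inner loop runs only over same-colored predecessors.
-- outside the precondition, e.g. on f([[0, 0], [0, 0]], []): A returns 0, B raises IndexError
import Mathlib
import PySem

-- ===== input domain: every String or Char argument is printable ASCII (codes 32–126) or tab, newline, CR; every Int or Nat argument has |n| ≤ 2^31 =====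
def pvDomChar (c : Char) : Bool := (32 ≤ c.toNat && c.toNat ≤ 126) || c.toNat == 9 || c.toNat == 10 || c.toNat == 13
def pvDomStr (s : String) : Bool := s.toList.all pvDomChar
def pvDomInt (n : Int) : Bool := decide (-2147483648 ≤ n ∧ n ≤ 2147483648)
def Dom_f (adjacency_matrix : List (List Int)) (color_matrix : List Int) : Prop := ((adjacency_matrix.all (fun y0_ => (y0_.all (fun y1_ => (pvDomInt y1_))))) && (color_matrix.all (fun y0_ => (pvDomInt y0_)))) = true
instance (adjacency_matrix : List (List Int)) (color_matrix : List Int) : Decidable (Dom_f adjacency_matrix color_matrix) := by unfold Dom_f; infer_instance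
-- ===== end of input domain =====

-- B maintains a dict color -> earlier indices of that color and counts conflicts in one pass;
-- A scans the whole upper triangle. Equal return value on Pre_f; structurally different algorithm.

-- ===== PORT A =====
def f (adjacency_matrix : List (List Int)) (color_matrix : List Int) : Int :=
  let num_nodes : Int := adjacency_matrix.length
  let conflicts : Int :=
    (PySem.List.pyRange 0 num_nodes 1).foldl (fun acc i =>
      (PySem.List.pyRange (i + 1) num_nodes 1).foldl (fun acc j =>
        if PySem.List.pyGetD (PySem.List.pyGetD adjacency_matrix i []) j 0 ≠ 0 ∧
           PySem.List.pyGetD color_matrix i 0 = PySem.List.pyGetD color_matrix j 0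
        then acc + 1 else acc) acc) 0
  PySem.Int.floordiv conflicts 2

-- ===== PORT B =====
def f_alt (adjacency_matrix : List (List Int)) (color_matrix : List Int) : Int :=
  let n : Int := adjacency_matrix.length
  let st :=
    (PySem.List.pyRange 0 n 1).foldl (fun (st : PySem.Dict Int (List Int) × Int) j =>
      let color := PySem.List.pyGetD color_matrix j 0
      let conflicts :=
        (st.1.getD color []).foldl (fun acc a =>
          if PySem.List.pyGetD (PySem.List.pyGetD adjacency_matrix a []) j 0 ≠ 0
          then acc + 1 else acc) st.2
      (st.1.modify color [] (· ++ [j]), conflicts)) (PySem.Dict.empty, 0)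
  PySem.Int.floordiv st.2 2

-- ===== PRECONDITION & SPEC =====
-- Pre_f excludes the inputs where indexing raises: color_matrix must cover all nodes and each
-- non-final row all columns. This is slightly narrower than A's exact return domain: A's
-- short-circuit 'and' skips the color reads when an adjacency entry is falsy, so A can still
-- return on a too-short color_matrix with enough zero entries, where the natural B raises.
def Pre_f (adjacency_matrix : List (List Int)) (color_matrix : List Int) : Prop :=
  adjacency_matrix.length ≤ color_matrix.length ∧
    ∀ row ∈ adjacency_matrix.dropLast, adjacency_matrix.length ≤ row.length
instance (adjacency_matrix : List (List Int)) (color_matrix : List Int) : Decidable (Pre_f adjacency_matrix color_matrix) := by unfold Pre_f; infer_instance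

def pvWitness_f : List (List Int) × List Int := ([[0, 1], [1, 0]], [1, 1])

def Spec_f (adjacency_matrix : List (List Int)) (color_matrix : List Int) (out : Int) : Prop := out = f_alt adjacency_matrix color_matrix
instance (adjacency_matrix : List (List Int)) (color_matrix : List Int) (out : Int) : Decidable (Spec_f adjacency_matrix color_matrix out) := by unfold Spec_f; infer_instance

-- ===== CLAIM (what is proved, stated in full; the proofs are below) =====
def Claim_equal_f : Prop := ∀ (adjacency_matrix : List (List Int)) (color_matrix : List Int), Dom_f adjacency_matrix color_matrix → Pre_f adjacency_matrix color_matrix → Spec_f adjacency_matrix color_matrix (f adjacency_matrix color_matrix)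

-- ===== LEMMAS AND PROOFS =====

-- the 0/1 indicator both ports count
def pvG (adjacency_matrix : List (List Int)) (color_matrix : List Int) (a j : Int) : Int :=
  if PySem.List.pyGetD (PySem.List.pyGetD adjacency_matrix a []) j 0 ≠ 0 ∧
     PySem.List.pyGetD color_matrix a 0 = PySem.List.pyGetD color_matrix j 0
  then 1 else 0

-- 'if p then acc+1 else acc' loop as a 0/1-sum
theorem pv_foldl_ite_one (p : Int → Prop) [DecidablePred p] (l : List Int) (a : Int) :
    l.foldl (fun acc j => if p j then acc + 1 else acc) a
      = a + (l.map (fun j => if p j then (1 : Int) else 0)).sum := by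
  induction l generalizing a with
  | nil => simp
  | cons x t ih => simp only [List.foldl_cons, List.map_cons, List.sum_cons, ih]; split_ifs <;> ring

-- sum over a filtered list of a 0/1 indicator = sum over the whole list of the conjunction
theorem pv_sum_filter_ite (p : Int → Prop) [DecidablePred p] (q : Int → Bool) (l : List Int) :
    ((l.filter q).map (fun a => if p a then (1 : Int) else 0)).sum
      = (l.map (fun a => if p a ∧ q a = true then (1 : Int) else 0)).sum := by
  induction l with
  | nil => simp
  | cons x t ih =>
    by_cases hq : q x = true
    · simp only [List.filter_cons, hq, if_pos, List.map_cons, List.sum_cons, ih]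
      by_cases hp : p x <;> simp [hp]
    · simp only [List.filter_cons, hq]
      simp only [Bool.false_eq_true, if_false, List.map_cons, List.sum_cons, ih]
      by_cases hp : p x <;> simp [hp, hq]

-- triangle swap: sum over rows (i, j>i) = sum over columns (j, a<j)
theorem pv_tri (g : Int → Int → Int) : ∀ n : Nat,
    ((PySem.List.pyRange 0 (n : Int) 1).map
        (fun i => ((PySem.List.pyRange (i + 1) (n : Int) 1).map (fun j => g i j)).sum)).sum
      = ((PySem.List.pyRange 0 (n : Int) 1).map
        (fun j => ((PySem.List.pyRange 0 j 1).map (fun a => g a j)).sum)).sum := by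
  intro n
  induction n with
  | zero => simp [PySem.List.pyRange_one_eq_nil]
  | succ m ih =>
    have hcast : ((m + 1 : Nat) : Int) = (m : Int) + 1 := by push_cast; ring
    rw [hcast, PySem.List.pyRange_one_succ_right (by positivity)]
    have hrow : ∀ i ∈ PySem.List.pyRange 0 (m : Int) 1,
        ((PySem.List.pyRange (i + 1) ((m : Int) + 1) 1).map (fun j => g i j)).sum
          = ((PySem.List.pyRange (i + 1) (m : Int) 1).map (fun j => g i j)).sum + g i (m : Int) := by
      intro i hi
      rw [PySem.List.mem_pyRange_one] at hi
      rw [PySem.List.pyRange_one_succ_right (by omega)]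
      simp
    calc ((PySem.List.pyRange 0 (m : Int) 1 ++ [(m : Int)]).map
            (fun i => ((PySem.List.pyRange (i + 1) ((m : Int) + 1) 1).map (fun j => g i j)).sum)).sum
        = ((PySem.List.pyRange 0 (m : Int) 1).map
            (fun i => ((PySem.List.pyRange (i + 1) ((m : Int) + 1) 1).map (fun j => g i j)).sum)).sum
          + ((PySem.List.pyRange ((m : Int) + 1) ((m : Int) + 1) 1).map (fun j => g (m : Int) j)).sum := by
            simp
      _ = ((PySem.List.pyRange 0 (m : Int) 1).map
            (fun i => ((PySem.List.pyRange (i + 1) (m : Int) 1).map (fun j => g i j)).sum + g i (m : Int))).sum := by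
            rw [List.map_congr_left hrow, PySem.List.pyRange_one_eq_nil (le_refl _)]
            simp
      _ = ((PySem.List.pyRange 0 (m : Int) 1).map
            (fun i => ((PySem.List.pyRange (i + 1) (m : Int) 1).map (fun j => g i j)).sum)).sum
          + ((PySem.List.pyRange 0 (m : Int) 1).map (fun i => g i (m : Int))).sum := by
            rw [PySem.List.sum_map_add_int]
      _ = ((PySem.List.pyRange 0 (m : Int) 1).map
            (fun j => ((PySem.List.pyRange 0 j 1).map (fun a => g a j)).sum)).sum
          + ((PySem.List.pyRange 0 (m : Int) 1).map (fun i => g i (m : Int))).sum := by rw [ih]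
      _ = ((PySem.List.pyRange 0 (m : Int) 1).map
            (fun j => ((PySem.List.pyRange 0 j 1).map (fun a => g a j)).sum)).sum
          + ((PySem.List.pyRange 0 ((m : Int)) 1).map (fun a => g a (m : Int))).sum := rfl
      _ = _ := by simp

-- the grouping dict after a modify-append loop: each color maps to its indices, in order
theorem pv_dictInv (key : Int → Int) : ∀ (l : List Int) (d : PySem.Dict Int (List Int)) (v : Int),
    (l.foldl (fun d j => d.modify (key j) [] (· ++ [j])) d).getD v []
      = d.getD v [] ++ l.filter (fun j => key j == v) := by
  intro l
  induction l with
  | nil => intro d v; simp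
  | cons x t ih =>
    intro d v
    rw [List.foldl_cons, ih, PySem.Dict.getD_modify, List.filter_cons]
    by_cases h : v = key x
    · simp [h]
    · have : (key x == v) = false := by simp [Ne.symm h]
      simp [h, this]

-- the dict component of B's pair fold evolves independently of the counter
theorem pv_fst_fold (key : Int → Int) (g : PySem.Dict Int (List Int) → Int → Int → Int) :
    ∀ (l : List Int) (st : PySem.Dict Int (List Int) × Int),
    (l.foldl (fun st j => (st.1.modify (key j) [] (· ++ [j]), g st.1 st.2 j)) st).1
      = l.foldl (fun d j => d.modify (key j) [] (· ++ [j])) st.1 := by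
  intro l
  induction l with
  | nil => intro st; rfl
  | cons x t ih => intro st; rw [List.foldl_cons, List.foldl_cons, ih]

-- the counter component of B's pair fold over range(n), with the dict state made explicit
theorem pv_snd_range (key : Int → Int) (g : PySem.Dict Int (List Int) → Int → Int → Int)
    (h : ∀ d acc j, g d acc j = acc + g d 0 j) : ∀ n : Nat,
    ((PySem.List.pyRange 0 (n : Int) 1).foldl
        (fun st j => (st.1.modify (key j) [] (· ++ [j]), g st.1 st.2 j))
        (PySem.Dict.empty, 0)).2
      = ((PySem.List.pyRange 0 (n : Int) 1).map (fun j =>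
          g ((PySem.List.pyRange 0 j 1).foldl
              (fun d a => d.modify (key a) [] (· ++ [a])) PySem.Dict.empty) 0 j)).sum := by
  intro n
  induction n with
  | zero => simp [PySem.List.pyRange_one_eq_nil]
  | succ m ih =>
    have hcast : ((m + 1 : Nat) : Int) = (m : Int) + 1 := by push_cast; ring
    rw [hcast, PySem.List.pyRange_one_succ_right (by positivity), List.foldl_append,
      List.map_append, List.sum_append]
    simp only [List.foldl_cons, List.foldl_nil, List.map_cons, List.map_nil, List.sum_cons,
      List.sum_nil]
    rw [h, ih, pv_fst_fold]
    ring

-- ===== VERDICT =====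
theorem f_spec : Claim_equal_f := by
  intro adj c _ _
  unfold Spec_f
  have hA : f adj c = PySem.Int.floordiv
      (((PySem.List.pyRange 0 (adj.length : Int) 1).map (fun i =>
        ((PySem.List.pyRange (i + 1) (adj.length : Int) 1).map (fun j => pvG adj c i j)).sum)).sum) 2 := by
    unfold f
    dsimp only
    simp only [pv_foldl_ite_one]
    rw [PySem.List.foldl_add]
    rw [zero_add]
    rfl
  have hB : f_alt adj c = PySem.Int.floordiv
      (((PySem.List.pyRange 0 (adj.length : Int) 1).map (fun j =>
        ((PySem.List.pyRange 0 j 1).map (fun a => pvG adj c a j)).sum)).sum) 2 := by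
    unfold f_alt
    dsimp only
    rw [pv_snd_range (fun j => PySem.List.pyGetD c j 0)
        (fun d acc j => (d.getD (PySem.List.pyGetD c j 0) []).foldl
          (fun acc a => if PySem.List.pyGetD (PySem.List.pyGetD adj a []) j 0 ≠ 0
            then acc + 1 else acc) acc)
        (by intro d acc j; simp only []; rw [pv_foldl_ite_one, pv_foldl_ite_one]; ring) adj.length]
    have hcol : ∀ j ∈ PySem.List.pyRange 0 (adj.length : Int) 1,
        ((((PySem.List.pyRange 0 j 1).foldl
            (fun d a => d.modify (PySem.List.pyGetD c a 0) [] (· ++ [a]))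
            PySem.Dict.empty).getD (PySem.List.pyGetD c j 0) []).foldl
          (fun acc a => if PySem.List.pyGetD (PySem.List.pyGetD adj a []) j 0 ≠ 0
            then acc + 1 else acc) 0)
          = ((PySem.List.pyRange 0 j 1).map (fun a => pvG adj c a j)).sum := by
      intro j hj
      rw [pv_foldl_ite_one, pv_dictInv, PySem.Dict.getD_empty, List.nil_append, zero_add]
      rw [pv_sum_filter_ite]
      apply congrArg
      apply List.map_congr_left
      intro a _
      unfold pvG
      simp only [beq_iff_eq]
    rw [List.map_congr_left hcol]
  rw [hA, hB]
  exact congrArg (fun s => PySem.Int.floordiv s 2) (pv_tri (pvG adj c) adj.length)
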